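-- pv_equiv track=rewrite | github.com/0rl4nd0l/greyhound-racing-collector | gpt_prediction_enhancer.py | _parse_form_string
-- ===== SOURCE A (Python) =====
-- from typing import Dict, List, Optional, Any
--
-- def _parse_form_string(form_str: str) -> List[int]:
--     """Parse form string into list of positions"""
--     if not form_str:
--         return []
--
--     form_positions = []
--     # Handle various form formats
--     for char in str(form_str):
--         if char.isdigit():
--             form_positions.append(int(char))
--
--     return form_positions[-10:]  # Last 10 runs
-- ===== SOURCE B (Python) =====
-- from typing import List
--
-- def _parse_form_string(form_str: str) -> List[int]:
--     """Parse form string into list of positions (last 10), scanning from the end."""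
--     if not form_str:
--         return []
--     buf: List[int] = []
--     for char in reversed(form_str):
--         if char.isdigit():
--             buf.append(int(char))
--             if len(buf) == 10:
--                 break
--     buf.reverse()
--     return buf
-- ===== Notes on version B (the rewrite author's own statement) =====
-- stated objective: alternative
-- what changed: B scans the string right-to-left and stops as soon as 10 digits are collected (then reverses the buffer), instead of A's full forward scan building all digits and slicing the last 10.
import Mathlib
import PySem

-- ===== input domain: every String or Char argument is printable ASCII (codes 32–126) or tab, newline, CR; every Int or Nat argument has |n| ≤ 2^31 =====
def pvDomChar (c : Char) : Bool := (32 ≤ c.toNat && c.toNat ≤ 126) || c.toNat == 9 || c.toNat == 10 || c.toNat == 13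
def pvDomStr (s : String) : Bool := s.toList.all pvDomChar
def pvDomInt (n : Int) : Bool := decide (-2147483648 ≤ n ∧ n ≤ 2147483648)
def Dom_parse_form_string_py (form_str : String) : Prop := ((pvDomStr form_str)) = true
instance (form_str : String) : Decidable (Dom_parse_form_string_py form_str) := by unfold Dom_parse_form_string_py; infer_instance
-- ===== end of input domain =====

-- B scans the string right-to-left and stops once 10 digits are collected, instead of A's forward scan plus last-10 slice; same results.

-- ===== PORT A =====
-- forward scan: collect int(char) for every digit char, then take the last 10 via xs[-10:]
def parse_form_string_py (form_str : String) : List Int :=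
  if form_str = "" then []
  else
    let form_positions := form_str.toList.foldl
      (fun acc c => if PySem.Chars.isdigit c then acc ++ [((c.toNat : Int) - 48)] else acc) []
    PySem.List.slice form_positions (some (-10)) none

-- ===== PORT B =====
-- loop over reversed characters, appending digit values, breaking at length 10
def pvAltLoop : List Char → List Int → List Int
  | [], buf => buf
  | c :: rest, buf =>
    if PySem.Chars.isdigit c then
      let buf' := buf ++ [((c.toNat : Int) - 48)]
      if buf'.length = 10 then buf' else pvAltLoop rest buf'
    else pvAltLoop rest buf

def parse_form_string_py_alt (form_str : String) : List Int :=
  if form_str = "" then []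
  else (pvAltLoop form_str.toList.reverse []).reverse

-- ===== PRECONDITION & SPEC =====
def Spec_parse_form_string_py (form_str : String) (out : List Int) : Prop := out = parse_form_string_py_alt form_str
instance (form_str : String) (out : List Int) : Decidable (Spec_parse_form_string_py form_str out) := by unfold Spec_parse_form_string_py; infer_instance

-- ===== CLAIM (what is proved, stated in full; the proofs are below) =====
def Claim_equal_parse_form_string_py : Prop := ∀ (form_str : String), Dom_parse_form_string_py form_str → Spec_parse_form_string_py form_str (parse_form_string_py form_str)

-- ===== LEMMAS AND PROOFS =====

-- the digit values of l in order
def pvDigits (l : List Char) : List Int :=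
  (l.filter PySem.Chars.isdigit).map (fun c => ((c.toNat : Int) - 48))

theorem pvAltLoop_spec (l : List Char) (buf : List Int) (h : buf.length < 10) :
    pvAltLoop l buf = buf ++ (pvDigits l).take (10 - buf.length) := by
  induction l generalizing buf with
  | nil => simp [pvAltLoop, pvDigits]
  | cons c rest ih =>
    by_cases hd : PySem.Chars.isdigit c
    · simp only [pvAltLoop, hd, if_pos, List.length_append, List.length_cons, List.length_nil]
      by_cases hl : buf.length + 1 = 10
      · have : 10 - buf.length = 1 := by omega
        simp [hl, pvDigits, hd, this]
      · rw [if_neg (by simpa using hl), ih _ (by simp; omega)]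
        have h1 : 10 - buf.length = (10 - (buf.length + 1)) + 1 := by omega
        simp [pvDigits, hd, h1, List.take_succ_cons]
    · simp [pvAltLoop, hd, ih _ h, pvDigits]

theorem pvDigits_reverse (l : List Char) : pvDigits l.reverse = (pvDigits l).reverse := by
  simp [pvDigits]

theorem pvRevTakeRev {α : Type} (xs : List α) (n : ℕ) :
    (xs.reverse.take n).reverse = xs.drop (xs.length - n) := by
  rcases Nat.lt_or_ge xs.length n with h | h
  · rw [List.take_of_length_le (by simpa using h.le), List.reverse_reverse]
    have h0 : xs.length - n = 0 := by omega
    simp [h0]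
  · rw [List.take_reverse, List.reverse_reverse]

theorem parse_form_string_py_spec : Claim_equal_parse_form_string_py := by
  intro s _
  unfold Spec_parse_form_string_py parse_form_string_py parse_form_string_py_alt
  by_cases hs : s = ""
  · simp [hs]
  · simp only [hs, ite_false]
    rw [PySem.List.foldl_append_if, pvAltLoop_spec _ _ (by simp)]
    show PySem.List.slice (pvDigits s.toList) _ _ = _
    rw [PySem.List.slice_from_neg_ofNat _ 10 (by omega), pvDigits_reverse]
    simp [pvRevTakeRev, pvDigits]
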